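-- pv_equiv track=rewrite | github.com/sjswuitchik/duck_comp_gen | 03b_CESAR/FilterGtfFromCesarGenepred.py | RestoreAnnotationHierarchy
-- ===== SOURCE A (Python) =====
-- def RestoreAnnotationHierarchy(gtf_dict,hierarchy=None):
--     hierarchy = ['transcript','exon','CDS','start_codon','stop_codon']
--     for transcript in gtf_dict:
--         reordered_features = []
--         for level in hierarchy:
--             for i in range(len(gtf_dict[transcript]['features'])):
--                 if gtf_dict[transcript]['features'][i] == level:
--                     reordered_features.append(gtf_dict[transcript]['lines'][i])
--         gtf_dict[transcript]['reordered_features'] = reordered_features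
--
--     return gtf_dict
-- ===== SOURCE B (Python) =====
-- def RestoreAnnotationHierarchy(gtf_dict, hierarchy=None):
--     levels = ['transcript', 'exon', 'CDS', 'start_codon', 'stop_codon']
--     for transcript in gtf_dict:
--         rec = gtf_dict[transcript]
--         feats = rec['features']
--         buckets = {level: [] for level in levels}
--         for i in range(len(feats)):
--             if feats[i] in buckets:
--                 buckets[feats[i]].append(rec['lines'][i])
--         rec['reordered_features'] = [line for level in levels for line in buckets[level]]
--     return gtf_dict
-- ===== Notes on version B (the rewrite author's own statement) =====
-- stated objective: faster
-- what changed: Replaces the five repeated scans of each transcript's feature list (one full scan per hierarchy level) by a single pass that distributes lines into per-level buckets, concatenated in hierarchy order afterwards.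
import Mathlib
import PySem

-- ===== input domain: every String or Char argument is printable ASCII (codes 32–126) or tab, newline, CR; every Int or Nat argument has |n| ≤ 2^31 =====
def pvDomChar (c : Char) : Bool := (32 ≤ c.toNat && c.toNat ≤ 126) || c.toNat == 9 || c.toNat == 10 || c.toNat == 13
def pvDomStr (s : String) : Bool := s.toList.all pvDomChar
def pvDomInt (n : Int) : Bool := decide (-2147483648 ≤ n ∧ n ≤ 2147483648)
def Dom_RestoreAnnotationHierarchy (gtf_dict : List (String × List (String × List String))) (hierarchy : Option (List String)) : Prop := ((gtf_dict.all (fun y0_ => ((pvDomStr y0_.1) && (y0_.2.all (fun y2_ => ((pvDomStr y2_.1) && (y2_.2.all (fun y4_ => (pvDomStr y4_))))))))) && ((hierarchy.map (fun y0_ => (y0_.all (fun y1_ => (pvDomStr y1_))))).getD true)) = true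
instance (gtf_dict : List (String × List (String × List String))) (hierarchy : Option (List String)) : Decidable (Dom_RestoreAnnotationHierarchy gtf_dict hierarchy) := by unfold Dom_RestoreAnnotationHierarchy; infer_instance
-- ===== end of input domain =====

-- B replaces A's five per-level scans of each transcript's feature list by one bucketing pass;
-- A also mutates its argument in place in Python — only the RETURN value is compared here.

-- ===== PORT A =====
-- A: for each transcript (dict iteration), for each of the 5 hierarchy levels, scan all feature
-- indices and append the matching lines; store the result under 'reordered_features'.
def pvHier : List String := ["transcript", "exon", "CDS", "start_codon", "stop_codon"]

def RestoreAnnotationHierarchy (gtf_dict : List (String × List (String × List String))) (hierarchy : Option (List String)) : List (String × List (String × List String)) :=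
  -- the Python immediately overwrites the 'hierarchy' parameter with the literal list
  let d0 : PySem.Dict String (PySem.Dict String (List String)) :=
    PySem.Dict.mk (gtf_dict.map (fun p => (p.1, PySem.Dict.mk p.2)))
  let dfin := (PySem.Dict.keys d0).foldl (fun d t =>
      let inner := (PySem.Dict.get? d t).getD (PySem.Dict.mk [])   -- gtf_dict[transcript]
      let feats := PySem.Dict.getD inner "features" []             -- gtf_dict[transcript]['features']  (Pre_ guarantees the key)
      let lns   := PySem.Dict.getD inner "lines" []                -- gtf_dict[transcript]['lines']      (Pre_ guarantees it where accessed)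
      let reordered := pvHier.foldl (fun acc level =>
          (PySem.List.pyRange 0 (feats.length : Int) 1).foldl (fun acc2 i =>
              if ((PySem.List.pyGet? feats i).getD "") == level
              then acc2 ++ [(PySem.List.pyGet? lns i).getD ""]     -- Pre_ makes this index in range
              else acc2) acc) []
      PySem.Dict.insert d t (PySem.Dict.insert inner "reordered_features" reordered)) d0
  (PySem.Dict.items dfin).map (fun p => (p.1, PySem.Dict.items p.2))

-- ===== PORT B =====
-- B: one pass over the feature indices, appending each matching line to its level's bucket;
-- the buckets are then concatenated in hierarchy order.
def RestoreAnnotationHierarchy_alt (gtf_dict : List (String × List (String × List String))) (hierarchy : Option (List String)) : List (String × List (String × List String)) :=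
  gtf_dict.map (fun p =>
    let rec0 := PySem.Dict.mk p.2
    let feats := PySem.Dict.getD rec0 "features" []
    let buckets0 : PySem.Dict String (List String) := PySem.Dict.mk (pvHier.map (fun l => (l, [])))
    let buckets := (PySem.List.pyRange 0 (feats.length : Int) 1).foldl (fun b i =>
        let f := (PySem.List.pyGet? feats i).getD ""
        if PySem.Dict.contains b f
        then PySem.Dict.modify b f [] (fun xs => xs ++ [(PySem.List.pyGet? (PySem.Dict.getD rec0 "lines" []) i).getD ""])
        else b) buckets0
    let reordered := pvHier.foldl (fun acc l => acc ++ PySem.Dict.getD buckets l []) []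
    (p.1, PySem.Dict.items (PySem.Dict.insert rec0 "reordered_features" reordered)))

-- ===== PRECONDITION & SPEC =====
-- Pre_ excludes (a) inputs where the Python raises: a transcript record without a 'features' key
-- (KeyError), or a feature equal to a hierarchy level at an index with no corresponding line
-- ('lines' missing or too short: KeyError/IndexError); and (b) association lists with duplicate
-- outer or inner keys, which cannot arise from a real Python dict (the representation collapses them).
def Pre_RestoreAnnotationHierarchy (gtf_dict : List (String × List (String × List String))) (hierarchy : Option (List String)) : Prop :=
  (gtf_dict.map Prod.fst).Nodup ∧
  ∀ p ∈ gtf_dict, (p.2.map Prod.fst).Nodup ∧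
    "features" ∈ p.2.map Prod.fst ∧
    (∀ i : Nat, i < (PySem.Dict.getD (PySem.Dict.mk p.2) "features" []).length →
      (PySem.Dict.getD (PySem.Dict.mk p.2) "features" []).getD i "" ∈ pvHier →
      ("lines" ∈ p.2.map Prod.fst ∧ i < (PySem.Dict.getD (PySem.Dict.mk p.2) "lines" []).length))
instance (gtf_dict : List (String × List (String × List String))) (hierarchy : Option (List String)) : Decidable (Pre_RestoreAnnotationHierarchy gtf_dict hierarchy) := by unfold Pre_RestoreAnnotationHierarchy; infer_instance

def pvWitness_RestoreAnnotationHierarchy : (List (String × List (String × List String))) × Option (List String) :=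
  ([("g1", [("features", ["exon", "transcript", "foo"]), ("lines", ["L1", "L2", "L3"])])], none)

def Spec_RestoreAnnotationHierarchy (gtf_dict : List (String × List (String × List String))) (hierarchy : Option (List String)) (out : List (String × List (String × List String))) : Prop := out = RestoreAnnotationHierarchy_alt gtf_dict hierarchy
instance (gtf_dict : List (String × List (String × List String))) (hierarchy : Option (List String)) (out : List (String × List (String × List String))) : Decidable (Spec_RestoreAnnotationHierarchy gtf_dict hierarchy out) := by unfold Spec_RestoreAnnotationHierarchy; infer_instance

-- ===== CLAIM (what is proved, stated in full; the proofs are below) =====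
def Claim_equal_RestoreAnnotationHierarchy : Prop := ∀ (gtf_dict : List (String × List (String × List String))) (hierarchy : Option (List String)), Dom_RestoreAnnotationHierarchy gtf_dict hierarchy → Pre_RestoreAnnotationHierarchy gtf_dict hierarchy → Spec_RestoreAnnotationHierarchy gtf_dict hierarchy (RestoreAnnotationHierarchy gtf_dict hierarchy)

-- ===== LEMMAS AND PROOFS =====

-- helpers mirroring the two per-record computations
def pvBuckets0 : PySem.Dict String (List String) := PySem.Dict.mk (pvHier.map (fun l => (l, ([] : List String))))

def pvSel (feats lns : List String) (c : String) : List String :=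
  ((List.range feats.length).filter (fun i => feats.getD i "" == c)).map (fun i => lns.getD i "")

lemma pv_pg (xs : List String) (k : Nat) : (PySem.List.pyGet? xs ((k : Nat) : Int)).getD "" = xs.getD k "" :=
  PySem.List.pyGetD_natCast xs k ""

-- A's per-level inner scan, in closed form
lemma pvA_inner (feats lns : List String) (level : String) (acc : List String) :
    (PySem.List.pyRange 0 (feats.length : Int) 1).foldl
      (fun acc2 i => if ((PySem.List.pyGet? feats i).getD "") == level
                     then acc2 ++ [(PySem.List.pyGet? lns i).getD ""] else acc2) acc
    = acc ++ pvSel feats lns level := by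
  rw [PySem.List.pyRange_zero_natCast, List.foldl_map]
  simp only [pv_pg]
  exact PySem.List.foldl_append_if (fun k => feats.getD k "" == level) (fun k => lns.getD k "") _ acc

-- B's guarded bucket fold: the guard can be read off the initial buckets (keys never change)
lemma pv_guard (feats lns : List String) :
    ∀ (l : List Nat) (b : PySem.Dict String (List String)),
      (∀ x, b.contains x = pvBuckets0.contains x) →
      l.foldl (fun b k => if b.contains (feats.getD k "")
                          then b.modify (feats.getD k "") [] (fun xs => xs ++ [lns.getD k ""]) else b) b
      = l.foldl (fun b k => if pvBuckets0.contains (feats.getD k "")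
                            then b.modify (feats.getD k "") [] (fun xs => xs ++ [lns.getD k ""]) else b) b := by
  intro l
  induction l with
  | nil => intro b h; rfl
  | cons k rest ih =>
      intro b h
      simp only [List.foldl_cons, h]
      by_cases hg : pvBuckets0.contains (feats.getD k "") = true
      · simp only [hg, if_true]
        exact ih _ (by
          intro x
          rw [PySem.Dict.contains_modify, h]
          cases hx : (x == feats.getD k "") with
          | true => rw [Bool.true_or, eq_of_beq hx, hg]
          | false => rw [Bool.false_or])
      · simp only [Bool.not_eq_true] at hg
        simp only [hg, Bool.false_eq_true, if_false]
        exact ih _ h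

lemma pv_bucket (feats lns : List String) (c : String)
    (hc0 : pvBuckets0.getD c [] = []) (hcc : pvBuckets0.contains c = true) :
    PySem.Dict.getD ((PySem.List.pyRange 0 (feats.length : Int) 1).foldl
      (fun b i => if b.contains ((PySem.List.pyGet? feats i).getD "")
                  then b.modify ((PySem.List.pyGet? feats i).getD "") [] (fun xs => xs ++ [(PySem.List.pyGet? lns i).getD ""])
                  else b) pvBuckets0) c []
    = pvSel feats lns c := by
  rw [PySem.List.pyRange_zero_natCast, List.foldl_map]
  simp only [pv_pg]
  rw [pv_guard feats lns (List.range feats.length) pvBuckets0 (fun _ => rfl)]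
  have h1 := PySem.List.foldl_if_eq_foldl_filter (fun k => pvBuckets0.contains (feats.getD k ""))
      (fun b k => PySem.Dict.modify b (feats.getD k "") [] (fun xs => xs ++ [lns.getD k ""]))
      (List.range feats.length) pvBuckets0
  simp only [h1]
  have h2 := List.foldl_map (f := fun k => (feats.getD k "", lns.getD k ""))
      (g := fun d (p : String × String) => PySem.Dict.modify d p.1 [] (fun xs => xs ++ [p.2]))
      (l := (List.range feats.length).filter (fun k => pvBuckets0.contains (feats.getD k "")))
      (init := pvBuckets0)
  simp only [← h2]
  rw [PySem.Dict.getD_foldl_modify_append]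
  rw [hc0, List.filter_map]
  rw [List.nil_append, List.map_map]
  rw [List.filter_filter]
  unfold pvSel
  congr 1
  apply List.filter_congr
  intro k _
  show (((fun p : String × String => p.1 == c) ∘ fun k => (feats.getD k "", lns.getD k "")) k && pvBuckets0.contains (feats.getD k "")) = (feats.getD k "" == c)
  show ((feats.getD k "" == c) && pvBuckets0.contains (feats.getD k "")) = (feats.getD k "" == c)
  by_cases hk : feats.getD k "" = c
  · rw [hk, hcc, Bool.and_true]
  · have hb : (feats.getD k "" == c) = false := beq_eq_false_iff_ne.mpr hk
    rw [hb, Bool.false_and]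

-- the two per-record 'reordered_features' computations agree
lemma pvR_eq (feats lns : List String) :
    pvHier.foldl (fun acc level =>
      (PySem.List.pyRange 0 (feats.length : Int) 1).foldl
        (fun acc2 i => if ((PySem.List.pyGet? feats i).getD "") == level
                       then acc2 ++ [(PySem.List.pyGet? lns i).getD ""] else acc2) acc) []
    = pvHier.foldl (fun acc l => acc ++ PySem.Dict.getD
        ((PySem.List.pyRange 0 (feats.length : Int) 1).foldl
          (fun b i => if b.contains ((PySem.List.pyGet? feats i).getD "")
                      then b.modify ((PySem.List.pyGet? feats i).getD "") []
                             (fun xs => xs ++ [(PySem.List.pyGet? lns i).getD ""])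
                      else b) pvBuckets0) l []) [] := by
  simp only [pvHier, List.foldl_cons, List.foldl_nil]
  rw [pv_bucket feats lns "transcript" (by decide) (by decide),
      pv_bucket feats lns "exon" (by decide) (by decide),
      pv_bucket feats lns "CDS" (by decide) (by decide),
      pv_bucket feats lns "start_codon" (by decide) (by decide),
      pv_bucket feats lns "stop_codon" (by decide) (by decide)]
  simp only [pvA_inner]

-- A's fold over the keys with in-place insertion, on nodup keys, is a map over the entries
lemma pv_foldl_insert_map (F : PySem.Dict String (List String) → PySem.Dict String (List String)) :
    ∀ (l pre : List (String × PySem.Dict String (List String))),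
      ((pre ++ l).map Prod.fst).Nodup →
      ((l.map Prod.fst).foldl
        (fun d t => PySem.Dict.insert d t (F ((PySem.Dict.get? d t).getD (PySem.Dict.mk []))))
        (PySem.Dict.mk (pre.map (fun p => (p.1, F p.2)) ++ l)))
      = PySem.Dict.mk ((pre ++ l).map (fun p => (p.1, F p.2))) := by
  intro l
  induction l with
  | nil => intro pre _; simp
  | cons x rest ih =>
      intro pre h
      obtain ⟨t, v⟩ := x
      simp only [List.map_cons, List.foldl_cons]
      have hkeys : (PySem.Dict.mk (pre.map (fun p => (p.1, F p.2)) ++ (t, v) :: rest)).keys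
          = (pre ++ (t, v) :: rest).map Prod.fst := by
        simp [PySem.Dict.keys_mk]
      have hnd : (PySem.Dict.mk (pre.map (fun p => (p.1, F p.2)) ++ (t, v) :: rest)).keys.Nodup := by
        rw [hkeys]; exact h
      have hget : (PySem.Dict.mk (pre.map (fun p => (p.1, F p.2)) ++ (t, v) :: rest)).get? t = some v := by
        apply PySem.Dict.get?_of_mem_items _ _ hnd
        simp
      have htpre : ∀ p ∈ pre, p.1 ≠ t := by
        intro p hp hpt
        have := h
        rw [List.map_append, List.nodup_append] at this
        exact this.2.2 p.1 (List.mem_map_of_mem (f := Prod.fst) hp) t (by simp) hpt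
      have htrest : ∀ p ∈ rest, p.1 ≠ t := by
        intro p hp hpt
        have h2 := h
        rw [List.map_append, List.nodup_append] at h2
        have := h2.2.1
        simp only [List.map_cons, List.nodup_cons] at this
        exact this.1 (by rw [← hpt]; exact List.mem_map_of_mem hp)
      have hcont : (PySem.Dict.mk (pre.map (fun p => (p.1, F p.2)) ++ (t, v) :: rest)).contains t = true := by
        rw [PySem.Dict.contains_eq_isSome_get?, hget]; rfl
      have hins : (PySem.Dict.mk (pre.map (fun p => (p.1, F p.2)) ++ (t, v) :: rest)).insert t (F v)
          = PySem.Dict.mk ((pre ++ [(t, v)]).map (fun p => (p.1, F p.2)) ++ rest) := by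
        apply PySem.Dict.ext
        rw [PySem.Dict.items_insert_of_contains _ _ hcont]
        show List.map (fun p => if (p.1 == t) = true then (t, F v) else p)
              (pre.map (fun p => (p.1, F p.2)) ++ (t, v) :: rest)
            = ((pre ++ [(t, v)]).map (fun p => (p.1, F p.2)) ++ rest)
        rw [List.map_append, List.map_cons, List.map_append]
        simp only [List.map_cons, List.map_nil, List.append_assoc, List.singleton_append]
        congr 1
        · rw [List.map_map]
          apply List.map_congr_left
          intro p hp
          have hb : ((p.1 : String) == t) = false := beq_eq_false_iff_ne.mpr (htpre p hp)
          show (if ((p.1 == t) = true) then (t, F v) else (p.1, F p.2)) = (p.1, F p.2)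
          rw [hb]
          simp
        · congr 1
          · simp
          · have : ∀ p ∈ rest, (fun p => if (p.1 == t) = true then (t, F v) else p) p = id p := by
              intro p hp
              have hb : ((p.1 : String) == t) = false := beq_eq_false_iff_ne.mpr (htrest p hp)
              simp [hb]
            rw [List.map_congr_left this, List.map_id]
      have h' : (((pre ++ [(t, v)]) ++ rest).map Prod.fst).Nodup := by
        rw [List.append_assoc, List.singleton_append]; exact h
      rw [hget]
      simp only [Option.getD_some]
      rw [hins]
      have := ih (pre ++ [(t, v)]) h'
      rw [this, List.append_assoc, List.singleton_append]

-- ===== VERDICT (by name: the statement is the Claim_ definition above) =====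
theorem RestoreAnnotationHierarchy_spec : Claim_equal_RestoreAnnotationHierarchy := by
  intro gtf_dict hierarchy _hdom hpre
  unfold Spec_RestoreAnnotationHierarchy
  unfold RestoreAnnotationHierarchy RestoreAnnotationHierarchy_alt
  simp only []
  have hnd : (([] ++ gtf_dict.map (fun (p : String × List (String × List String)) => (p.1, PySem.Dict.mk p.2))).map
      (Prod.fst (α := String) (β := PySem.Dict String (List String)))).Nodup := by
    rw [List.nil_append, List.map_map]
    exact hpre.1
  have hfold := pv_foldl_insert_map
      (fun inner => PySem.Dict.insert inner "reordered_features"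
        (pvHier.foldl (fun acc level =>
          (PySem.List.pyRange 0 (((PySem.Dict.getD inner "features" []).length : Nat) : Int) 1).foldl
            (fun acc2 i => if ((PySem.List.pyGet? (PySem.Dict.getD inner "features" []) i).getD "") == level
                           then acc2 ++ [(PySem.List.pyGet? (PySem.Dict.getD inner "lines" []) i).getD ""]
                           else acc2) acc) []))
      (gtf_dict.map (fun p => (p.1, PySem.Dict.mk p.2))) [] hnd
  simp only [List.map_nil, List.nil_append] at hfold
  rw [show (PySem.Dict.mk (gtf_dict.map (fun p => (p.1, PySem.Dict.mk p.2)))).keys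
      = (gtf_dict.map (fun p => (p.1, PySem.Dict.mk p.2))).map Prod.fst from PySem.Dict.keys_mk _]
  simp only [hfold]
  rw [List.map_map, List.map_map]
  apply List.map_congr_left
  intro p _
  simp only [Function.comp_apply]
  rw [pvR_eq]
  rfl
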